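-- pv_equiv track=rewrite | github.com/pypi-data/pypi-mirror-74 | packages/itsim-scripts/itsim_scripts-0.5.0.tar.gz/itsim_scripts-0.5.0/src/itsim_scripts/utils.py | _split_by_lang
-- ===== SOURCE A (Python) =====
-- def _split_by_lang(value, default_i18n, prop):
--     res = {}
--     if value != "none":
--         if value in default_i18n:
--             res = default_i18n.get(value).get(prop)
--         else:
--             it = iter(value.split(','))
--             try:
--                 while True:
--                     lang, text = next(it, None), next(it, None)
--                     if lang is None:
--                         break
--                     res[lang] = text
--             except StopIteration:
--                 return
--     return res
-- ===== SOURCE B (Python) =====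
-- def _split_by_lang(value, default_i18n, prop):
--     if value == "none":
--         return {}
--     if value in default_i18n:
--         return default_i18n[value].get(prop)
--     parts = value.split(',')
--     parts += [None] * (len(parts) % 2)  # odd field count: the trailing lang has no text
--     return dict(zip(parts[0::2], parts[1::2]))
-- ===== Notes on version B (the rewrite author's own statement) =====
-- stated objective: idiomatic
-- what changed: Replaces the stateful next()-pulling while loop (with its dead StopIteration handler) by slicing the split parts into even/odd sublists and zipping them into a dict, behind a plain early-return chain.
-- outside the precondition, e.g. on _split_by_lang('a', {}, 'x'): A returns {'a': None}, B returns {'a': None}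
import Mathlib
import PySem

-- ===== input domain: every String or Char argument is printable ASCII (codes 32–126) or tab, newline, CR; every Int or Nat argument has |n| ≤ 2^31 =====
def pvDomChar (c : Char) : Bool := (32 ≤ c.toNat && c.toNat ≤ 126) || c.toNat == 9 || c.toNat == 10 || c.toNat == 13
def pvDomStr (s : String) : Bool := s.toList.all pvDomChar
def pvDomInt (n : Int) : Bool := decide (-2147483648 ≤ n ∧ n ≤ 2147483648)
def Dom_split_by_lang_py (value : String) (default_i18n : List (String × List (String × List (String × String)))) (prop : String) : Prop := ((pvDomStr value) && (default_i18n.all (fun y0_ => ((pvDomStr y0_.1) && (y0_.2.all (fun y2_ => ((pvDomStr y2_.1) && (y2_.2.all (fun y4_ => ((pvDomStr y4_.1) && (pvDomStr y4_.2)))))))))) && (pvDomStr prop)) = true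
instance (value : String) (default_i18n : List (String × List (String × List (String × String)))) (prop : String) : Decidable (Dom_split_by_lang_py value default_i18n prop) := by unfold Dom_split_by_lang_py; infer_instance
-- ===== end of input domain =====

-- B replaces A's stateful next()-pulling while loop by slicing the split parts into
-- even/odd sublists and zipping them into a dict (objective: more idiomatic; same cost).

-- ===== PORT A =====
-- the while-True pull loop of A: take two parts at a time, res[lang] = text; on a single
-- leftover part Python stores None (no String value) — those inputs are outside Pre_ below,
-- here the leftover lang is mapped to "" (never reached inside Pre_)
def pvParseLoopA : List String → PySem.Dict String String → PySem.Dict String String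
  | [], d => d
  | [l], d => d.insert l ""
  | l :: t :: rest, d => pvParseLoopA rest (d.insert l t)

def split_by_lang_py (value : String) (default_i18n : List (String × List (String × List (String × String)))) (prop : String) : Option (List (String × String)) :=
  if value ≠ "none" then
    if (PySem.Dict.mk default_i18n).contains value then
      match (PySem.Dict.mk default_i18n).get? value with
      | some inner => (PySem.Dict.mk inner).get? prop
      | none => none
    else
      some (pvParseLoopA ((PySem.Str.split? value ",").getD []) PySem.Dict.empty).items
  else
    some []

-- ===== PORT B =====
def split_by_lang_py_alt (value : String) (default_i18n : List (String × List (String × List (String × String)))) (prop : String) : Option (List (String × String)) :=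
  if value == "none" then
    some []
  else if (PySem.Dict.mk default_i18n).contains value then
    match (PySem.Dict.mk default_i18n).get? value with
    | some inner => (PySem.Dict.mk inner).get? prop
    | none => none
  else
    let parts0 := (PySem.Str.split? value ",").getD []
    -- Source B pads an odd parts list with one None (textless trailing lang); None has no String
    -- form, "" stands in for it (the pad is only reached outside Pre_ below)
    let parts := parts0 ++ List.replicate (parts0.length % 2) ""
    let langs := (PySem.List.slice? parts (some 0) none 2).getD []
    let texts := (PySem.List.slice? parts (some 1) none 2).getD []
    some ((langs.zip texts).foldl (fun d p => d.insert p.1 p.2) PySem.Dict.empty).items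

-- ===== PRECONDITION & SPEC =====
-- Pre_ excludes inputs whose parsed branch splits into an ODD number of comma-separated
-- fields: there A (and B alike) maps the textless trailing lang to Python None, which is
-- not a String of the declared return type, so that dict has no Lean form.
def Pre_split_by_lang_py (value : String) (default_i18n : List (String × List (String × List (String × String)))) (prop : String) : Prop :=
  value = "none" ∨ (PySem.Dict.mk default_i18n).contains value = true ∨
    ((PySem.Str.split? value ",").getD []).length % 2 = 0

instance (value : String) (default_i18n : List (String × List (String × List (String × String)))) (prop : String) : Decidable (Pre_split_by_lang_py value default_i18n prop) := by unfold Pre_split_by_lang_py; infer_instance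

def pvWitness_split_by_lang_py : String × (List (String × List (String × List (String × String)))) × String :=
  ("en,Hello,fr,Salut", [("de", [("greet", [("de", "Hallo")])])], "greet")

def Spec_split_by_lang_py (value : String) (default_i18n : List (String × List (String × List (String × String)))) (prop : String) (out : Option (List (String × String))) : Prop := out = split_by_lang_py_alt value default_i18n prop
instance (value : String) (default_i18n : List (String × List (String × List (String × String)))) (prop : String) (out : Option (List (String × String))) : Decidable (Spec_split_by_lang_py value default_i18n prop out) := by unfold Spec_split_by_lang_py; infer_instance

-- ===== CLAIM (what is proved, stated in full; the proofs are below) =====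
def Claim_equal_split_by_lang_py : Prop := ∀ (value : String) (default_i18n : List (String × List (String × List (String × String)))) (prop : String), Dom_split_by_lang_py value default_i18n prop → Pre_split_by_lang_py value default_i18n prop → Spec_split_by_lang_py value default_i18n prop (split_by_lang_py value default_i18n prop)

-- ===== LEMMAS AND PROOFS =====

-- the even-index (xs[0::2]) and odd-index (xs[1::2]) sublists, structurally
def pvEvens {α : Type} : List α → List α
  | [] => []
  | [a] => [a]
  | a :: _ :: r => a :: pvEvens r

def pvOdds {α : Type} : List α → List α
  | [] => []
  | [_] => []
  | _ :: b :: r => b :: pvOdds r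

lemma pv_filterMap_evens {α : Type} (l : List α) :
    (List.range ((l.length + 1) / 2)).filterMap (fun k => l[2 * k]?) = pvEvens l := by
  induction l using pvEvens.induct with
  | case1 => simp [pvEvens]
  | case2 a => simp [pvEvens]
  | case3 a b r ih =>
    have h : ((a :: b :: r).length + 1) / 2 = (r.length + 1) / 2 + 1 := by simp; omega
    rw [h, List.range_succ_eq_map, List.filterMap_cons, List.filterMap_map]
    simp only [pvEvens, Function.comp]
    have : ∀ k : Nat, (a :: b :: r)[2 * (k + 1)]? = r[2 * k]? := by
      intro k
      have : 2 * (k + 1) = 2 * k + 2 := by ring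
      simp [this]
    simp only [this]
    simp [ih]

lemma pv_slice_evens {α : Type} (l : List α) :
    PySem.List.slice? l (some 0) none 2 = some (pvEvens l) := by
  rw [← pv_filterMap_evens]
  simp only [PySem.List.slice?, PySem.List.sliceIndices]
  norm_num
  have hc : (if 0 < l.length then (((l.length : ℤ) + 2 - 1) / 2).toNat else 0) = (l.length + 1) / 2 := by
    split <;> omega
  have hf : (fun x : ℕ => l[(2 * (x : ℤ)).toNat]?) = (fun k : ℕ => l[2 * k]?) := by
    funext x
    have h2 : (2 * (x : ℤ)).toNat = 2 * x := by omega
    rw [h2]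
  rw [hc, hf]

lemma pv_filterMap_odds {α : Type} (l : List α) :
    (List.range (l.length / 2)).filterMap (fun k => l[2 * k + 1]?) = pvOdds l := by
  induction l using pvOdds.induct with
  | case1 => simp [pvOdds]
  | case2 a => simp [pvOdds]
  | case3 a b r ih =>
    have h : (a :: b :: r).length / 2 = r.length / 2 + 1 := by simp; omega
    rw [h, List.range_succ_eq_map, List.filterMap_cons, List.filterMap_map]
    simp only [pvOdds, Function.comp]
    have : ∀ k : Nat, (a :: b :: r)[2 * (k + 1) + 1]? = r[2 * k + 1]? := by
      intro k
      have : 2 * (k + 1) + 1 = (2 * k + 1) + 2 := by ring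
      simp [this]
    simp only [this]
    simp [ih]

lemma pv_slice_odds {α : Type} (l : List α) :
    PySem.List.slice? l (some 1) none 2 = some (pvOdds l) := by
  cases l with
  | nil => rfl
  | cons a t =>
    rw [← pv_filterMap_odds]
    simp only [PySem.List.slice?, PySem.List.sliceIndices]
    norm_num
    have hc : (if 0 < t.length then (((t.length : ℤ) + 2 - 1) / 2).toNat else 0)
        = (t.length + 1) / 2 := by
      split <;> omega
    have hf : (fun x : ℕ => (a :: t)[(1 + 2 * (x : ℤ)).toNat]?) = (fun x : ℕ => t[2 * x]?) := by
      funext x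
      have h2 : (1 + 2 * (x : ℤ)).toNat = 2 * x + 1 := by omega
      rw [h2]
      simp
    rw [hc, hf]

-- A's pull loop over an even-length parts list is B's fold over zip(evens, odds)
lemma pv_loop_eq_zip_fold : ∀ (l : List String) (d : PySem.Dict String String), l.length % 2 = 0 →
    pvParseLoopA l d = ((pvEvens l).zip (pvOdds l)).foldl (fun d p => d.insert p.1 p.2) d := by
  intro l d
  induction l, d using pvParseLoopA.induct with
  | case1 d' => intro _; simp [pvParseLoopA, pvEvens, pvOdds]
  | case2 l' d' => intro h; simp at h
  | case3 lg tx rest d' ih =>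
    intro h
    have hr : rest.length % 2 = 0 := by simp at h; omega
    simp only [pvParseLoopA, pvEvens, pvOdds, List.zip_cons_cons, List.foldl_cons]
    exact ih hr

-- ===== VERDICT (by name: the statement is the Claim_ definition above) =====
theorem split_by_lang_py_spec : Claim_equal_split_by_lang_py := by
  intro value default_i18n prop _hdom hpre
  unfold Spec_split_by_lang_py split_by_lang_py split_by_lang_py_alt
  by_cases hv : value = "none"
  · simp [hv]
  · by_cases hc : (PySem.Dict.mk default_i18n).contains value = true
    · simp [hv, hc]
    · have hpar : ((PySem.Str.split? value ",").getD []).length % 2 = 0 := by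
        rcases hpre with h | h | h
        · exact absurd h hv
        · exact absurd h hc
        · exact h
      rw [if_pos hv, if_neg hc, if_neg (show ¬((value == "none") = true) by simp [hv]), if_neg hc]
      simp only [hpar, List.replicate_zero, List.append_nil, pv_slice_evens, pv_slice_odds,
        Option.getD_some]
      simp [pv_loop_eq_zip_fold _ _ hpar]
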